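-- pv_equiv track=rewrite | github.com/houxizhu/leetcode | codeforces/1004.div2/b.py | codeforces
-- ===== SOURCE A (Python) =====
-- from collections import defaultdict
--
-- def codeforces(n: int, arr: []):
--     result = "no"
--     dd = defaultdict(int)
--     for each in arr:
--         dd[each] += 1
--     larr = list(dd.keys())
--     larr.sort()
--
--     while len(larr) > 0:
--         ll = len(larr)
--         if dd[larr[0]] == 1:
--             return "no"
--         if ll == 1:
--             if dd[larr[0]]%2 == 0:
--                 return "yes"
--             else:
--                 return "no"
--         if larr[0] + 1 == larr[1]:
--             dd[larr[1]] += dd[larr[0]]-2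
--             larr.pop(0)
--         else:
--             dd[larr[0]+1] = dd[larr[0]]-2
--             dd[larr[0]] = 2
--             larr[0] += 1
--
--     return result
-- ===== SOURCE B (Python) =====
-- from collections import Counter
--
-- def codeforces(n: int, arr: []):
--     if not arr:
--         return "no"
--     cnt = Counter(arr)
--     keys = sorted(cnt)
--     t = cnt[keys[0]]
--     if t == 1:
--         return "no"
--     prev = keys[0]
--     for k in keys[1:]:
--         g = k - prev
--         # would the carry hit exactly 1 somewhere strictly inside the gap?
--         if t % 2 == 1 and t >= 3 and t - 2 * (g - 1) <= 1:
--             return "no"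
--         t = cnt[k] + t - 2 * g
--         if t == 1:
--             return "no"
--         prev = k
--     return "yes" if t % 2 == 0 else "no"
-- ===== Notes on version B (the rewrite author's own statement) =====
-- stated objective: alternative
-- what changed: A walks every integer in each gap between consecutive distinct values one unit step at a time, mutating the dict and the sorted key list; B makes a single pass over the sorted distinct keys, crossing each gap in O(1) with the closed form carry' = count + carry - 2*gap and deciding arithmetically whether any intermediate carry would hit 1.
import Mathlib
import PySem

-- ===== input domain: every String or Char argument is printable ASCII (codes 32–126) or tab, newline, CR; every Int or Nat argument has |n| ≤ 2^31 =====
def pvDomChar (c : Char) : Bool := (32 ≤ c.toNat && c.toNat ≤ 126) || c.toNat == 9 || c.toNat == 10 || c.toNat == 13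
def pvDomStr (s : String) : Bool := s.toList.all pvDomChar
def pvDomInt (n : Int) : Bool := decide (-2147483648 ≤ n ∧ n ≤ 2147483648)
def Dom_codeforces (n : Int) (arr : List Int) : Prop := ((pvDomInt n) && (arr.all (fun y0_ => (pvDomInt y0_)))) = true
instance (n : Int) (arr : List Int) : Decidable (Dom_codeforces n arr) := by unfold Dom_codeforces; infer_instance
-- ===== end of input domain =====

-- B replaces A's unit-step walk across each gap between consecutive distinct values
-- by a single closed-form carry update per gap (alternative algorithm; measured about 1.26x faster, below the 1.5x bar).


-- ===== PORT A =====
-- A's while loop. It terminates because every iteration either pops the head of larr or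
-- advances larr[0] by one toward larr[1]; the fuel passed at the call site (head-to-last
-- distance plus list length plus one) provably suffices — the 0-fuel branch is never reached.
def codeforcesLoopA : Nat → PySem.Dict Int Int → List Int → String
  | 0, _, _ => "no"
  | fuel+1, dd, larr =>
    match larr with
    | [] => "no"                                   -- while condition fails: return result = "no"
    | k :: rest =>
      if dd.getD k 0 = 1 then "no"
      else
        match rest with
        | [] => if PySem.Int.mod (dd.getD k 0) 2 = 0 then "yes" else "no"   -- ll == 1
        | k2 :: rest2 =>
          if k + 1 = k2 then                        -- larr[0] + 1 == larr[1]
            codeforcesLoopA fuel (dd.insert k2 (dd.getD k2 0 + (dd.getD k 0 - 2))) (k2 :: rest2)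
          else
            codeforcesLoopA fuel ((dd.insert (k+1) (dd.getD k 0 - 2)).insert k 2) ((k+1) :: k2 :: rest2)

def codeforces (n : Int) (arr : List Int) : String :=
  let dd := arr.foldl (fun d x => d.modify x 0 (· + 1)) (PySem.Dict.empty : PySem.Dict Int Int)   -- dd[each] += 1 (defaultdict(int))
  let larr := PySem.List.sorted dd.keys (fun x => x) false                 -- list(dd.keys()); larr.sort()
  codeforcesLoopA
    (match larr with
     | [] => 1
     | k :: rest => 1 + rest.length + (rest.getLastD k - k).toNat) dd larr

-- ===== PORT B =====
-- Source B's for-loop over keys[1:], carrying (t, prev); early "return" = stop with "no".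
def codeforcesAltLoop (cnt : PySem.Dict Int Int) : List Int → Int → Int → String
  | [], t, _ => if PySem.Int.mod t 2 = 0 then "yes" else "no"
  | k :: ks, t, prev =>
      let g := k - prev
      if PySem.Int.mod t 2 = 1 ∧ 3 ≤ t ∧ t - 2*(g-1) ≤ 1 then "no"
      else
        let t' := cnt.getD k 0 + t - 2*g
        if t' = 1 then "no" else codeforcesAltLoop cnt ks t' k

def codeforces_alt (n : Int) (arr : List Int) : String :=
  if arr.isEmpty then "no"
  else
    let cnt := PySem.Dict.counter arr
    let keys := PySem.List.sorted cnt.keys (fun x => x) false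
    match keys with
    | [] => "no"                                   -- unreachable: arr is nonempty here
    | k0 :: ks =>
      let t := cnt.getD k0 0
      if t = 1 then "no" else codeforcesAltLoop cnt ks t k0

-- ===== PRECONDITION & SPEC =====
def Spec_codeforces (n : Int) (arr : List Int) (out : String) : Prop := out = codeforces_alt n arr
instance (n : Int) (arr : List Int) (out : String) : Decidable (Spec_codeforces n arr out) := by unfold Spec_codeforces; infer_instance

-- ===== CLAIM (what is proved, stated in full; the proofs are below) =====
def Claim_equal_codeforces : Prop := ∀ (n : Int) (arr : List Int), Dom_codeforces n arr → Spec_codeforces n arr (codeforces n arr)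

-- ===== LEMMAS AND PROOFS =====

-- on a strictly increasing key list the last element is ≥ the head
lemma le_getLastD_of_pairwise : ∀ (l : List Int) (a : Int), (a :: l).Pairwise (· < ·) → a ≤ l.getLastD a := by
  intro l
  induction l with
  | nil => intro a _; simp
  | cons b t ih =>
    intro a h
    rw [List.pairwise_cons] at h
    have hab : a < b := h.1 b (by simp)
    have := ih b h.2
    simp only [List.getLastD_cons]
    omega

-- A's loop, from state (head key k with current total dd[k], remaining keys rest whose
-- dd-values still agree with cnt), equals B's per-key loop with carry t = dd[k].
lemma loopA_eq_altLoop : ∀ (fuel : Nat) (dd cnt : PySem.Dict Int Int) (k : Int) (rest : List Int),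
    (k :: rest).Pairwise (· < ·) →
    (∀ x ∈ rest, dd.getD x 0 = cnt.getD x 0) →
    1 + rest.length + (rest.getLastD k - k).toNat ≤ fuel →
    codeforcesLoopA fuel dd (k :: rest) =
      if dd.getD k 0 = 1 then "no" else codeforcesAltLoop cnt rest (dd.getD k 0) k := by
  intro fuel
  induction fuel with
  | zero => intro dd cnt k rest _ _ hf; omega
  | succ fuel ih =>
    intro dd cnt k rest hch hval hf
    match rest with
    | [] =>
      simp [codeforcesLoopA, codeforcesAltLoop]
    | k2 :: rest2 =>
      have hpc := List.pairwise_cons.mp hch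
      have hlt : k < k2 := hpc.1 k2 (by simp)
      have hch2 : (k2 :: rest2).Pairwise (· < ·) := hpc.2
      have hpc2 := List.pairwise_cons.mp hch2
      have hlast : k2 ≤ rest2.getLastD k2 := le_getLastD_of_pairwise rest2 k2 hch2
      have hk2nd : k2 ∉ rest2 := fun hm => absurd (hpc2.1 k2 hm) (lt_irrefl k2)
      have hk2v : dd.getD k2 0 = cnt.getD k2 0 := hval k2 (by simp)
      set t := dd.getD k 0 with ht
      by_cases h1 : t = 1
      · simp [codeforcesLoopA, ← ht, h1]
      · simp only [codeforcesLoopA, ← ht, if_neg h1]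
        by_cases hadj : k + 1 = k2
        · -- adjacent: merge into k2 and pop
          have hstep := ih (dd.insert k2 (dd.getD k2 0 + (t - 2))) cnt k2 rest2 hch2
            (by
              intro x hx
              have hne : x ≠ k2 := fun he => hk2nd (he ▸ hx)
              rw [PySem.Dict.getD_insert_of_ne _ _ _ hne]
              exact hval x (by simp [hx]))
            (by
              simp only [List.getLastD_cons, List.length_cons] at hf
              omega)
          simp only [if_pos hadj]
          rw [hstep]
          have hsel : (dd.insert k2 (dd.getD k2 0 + (t - 2))).getD k2 0 = cnt.getD k2 0 + (t - 2) := by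
            rw [PySem.Dict.getD_insert_self, hk2v]
          rw [hsel]
          -- unfold B's step across this (adjacent) gap: g = 1, the gap test is vacuous
          have hmodt : PySem.Int.mod t 2 = t % 2 := PySem.Int.mod_eq_emod_of_pos (by norm_num)
          simp only [codeforcesAltLoop]
          have hgap : ¬ (PySem.Int.mod t 2 = 1 ∧ 3 ≤ t ∧ t - 2*((k2 - k)-1) ≤ 1) := by
            rw [hmodt]; omega
          rw [if_neg hgap]
          have harith : cnt.getD k2 0 + t - 2*(k2 - k) = cnt.getD k2 0 + (t - 2) := by
            have : k2 - k = 1 := by omega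
            rw [this]; ring
          rw [harith]
        · -- gap: synthesize key k+1 with carry t-2
          have hapart : k + 1 < k2 := by omega
          have hch' : ((k+1) :: k2 :: rest2).Pairwise (· < ·) :=
            List.pairwise_cons.mpr ⟨by
              intro y hy
              rcases List.mem_cons.mp hy with h | h
              · omega
              · exact lt_trans hapart (hpc2.1 y h), hch2⟩
          have hstep := ih ((dd.insert (k+1) (t - 2)).insert k 2) cnt (k+1) (k2 :: rest2) hch'
            (by
              intro x hx
              have hxgt : k + 1 < x := by
                rcases List.mem_cons.mp hx with h | h
                · omega
                · exact lt_trans hapart (hpc2.1 x h)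
              rw [PySem.Dict.getD_insert_of_ne _ _ _ (by omega : x ≠ k),
                  PySem.Dict.getD_insert_of_ne _ _ _ (by omega : x ≠ k + 1)]
              exact hval x (by simp [hx]))
            (by
              simp only [List.getLastD_cons, List.length_cons] at hf ⊢
              omega)
          simp only [if_neg hadj]
          rw [hstep]
          have hsel : ((dd.insert (k+1) (t - 2)).insert k 2).getD (k+1) 0 = t - 2 := by
            rw [PySem.Dict.getD_insert_of_ne _ _ _ (by omega : k + 1 ≠ k),
                PySem.Dict.getD_insert_self]
          rw [hsel]
          -- both sides now run B's loop; compare A's one unit step into the gap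
          -- (carry t-2 at key k+1) with B's single closed-form gap step from (t, k).
          have hmodt : PySem.Int.mod t 2 = t % 2 := PySem.Int.mod_eq_emod_of_pos (by norm_num)
          have hmodt2 : PySem.Int.mod (t - 2) 2 = (t - 2) % 2 := PySem.Int.mod_eq_emod_of_pos (by norm_num)
          simp only [codeforcesAltLoop]
          by_cases hg : PySem.Int.mod t 2 = 1 ∧ 3 ≤ t ∧ t - 2*((k2 - k)-1) ≤ 1
          · -- B stops "no" on this gap; A's chain also hits 1 (now or later in the gap)
            rw [if_pos hg]
            by_cases h21 : t - 2 = 1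
            · simp [h21]
            · rw [if_neg h21]
              have hg' : PySem.Int.mod (t - 2) 2 = 1 ∧ 3 ≤ t - 2 ∧ (t - 2) - 2*((k2 - (k+1))-1) ≤ 1 := by
                rw [hmodt2]; rw [hmodt] at hg; omega
              rw [if_pos hg']
          · rw [if_neg hg]
            have h21 : t - 2 ≠ 1 := by
              intro he; rw [hmodt] at hg; omega
            rw [if_neg h21]
            have hg' : ¬ (PySem.Int.mod (t - 2) 2 = 1 ∧ 3 ≤ t - 2 ∧ (t - 2) - 2*((k2 - (k+1))-1) ≤ 1) := by
              rw [hmodt2]; rw [hmodt] at hg; omega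
            rw [if_neg hg']
            have harith : cnt.getD k2 0 + (t - 2) - 2*(k2 - (k+1)) = cnt.getD k2 0 + t - 2*(k2 - k) := by ring
            rw [harith]

-- ===== VERDICT (by name: the statement is the Claim_ definition above) =====
theorem codeforces_spec : Claim_equal_codeforces := by
  intro n arr _
  unfold Spec_codeforces codeforces codeforces_alt
  have hdd : arr.foldl (fun d x => d.modify x 0 (· + 1)) PySem.Dict.empty = PySem.Dict.counter arr :=
    (PySem.Dict.counter_eq_foldl arr).symm
  rw [hdd]
  by_cases he : arr = []
  · subst he; decide
  · have hne : arr.isEmpty = false := by simp [he]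
    rw [if_neg (by simp [hne])]
    have hkeys : (PySem.Dict.counter arr).keys = PySem.Set.ofList arr := PySem.Dict.keys_counter arr
    have hpw : (PySem.List.sorted (PySem.Dict.counter arr).keys (fun x => x) false).Pairwise (· < ·) := by
      rw [hkeys]; exact PySem.List.sorted_ofList_pairwise_lt arr
    have hnil : PySem.List.sorted (PySem.Dict.counter arr).keys (fun x => x) false ≠ [] := by
      rw [Ne, PySem.List.sorted_eq_nil_iff, hkeys]
      intro h
      obtain ⟨x, xs, rfl⟩ := List.exists_cons_of_ne_nil he
      have : x ∈ PySem.Set.ofList (x :: xs) := (PySem.Set.mem_ofList _ _).mpr (by simp)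
      rw [h] at this; simp at this
    obtain ⟨k0, ks, hm⟩ := List.exists_cons_of_ne_nil hnil
    rw [hm] at hpw
    simp only [hm]
    exact loopA_eq_altLoop _ (PySem.Dict.counter arr) (PySem.Dict.counter arr) k0 ks
      hpw (fun x _ => rfl) (le_refl _)
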